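-- pv_equiv track=rewrite | github.com/mkanevsky/VideoAnalyticsOpenCV | AnalyzeFrame.py | fix_string
-- ===== SOURCE A (Python) =====
-- def fix_string(s):
--     json_string_fin = ""
--     last_c=""
--     for c in s:
--         if c!="\'":
--             json_string_fin += c
--             if c=="{":
--                 if last_c=="\'":
--                     json_string_fin = last_string + "\'{"
--         else:
--             last_string = json_string_fin
--             if last_c!="}":
--                 json_string_fin += "\""
--             else:
--                 json_string_fin += "\'"
--         last_c = c
--     return json_string_fin
-- ===== SOURCE B (Python) =====
-- def fix_string(s):
--     # Stateless re-formulation: each output char depends only on its neighbours.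
--     # A quote stays a quote iff preceded by '}' or followed by '{'; otherwise it
--     # becomes '"'. Every other char is copied unchanged. No accumulator state,
--     # no rollback: just a zip over the string and its two shifted copies.
--     chars = list(s)
--     prevs = [None] + chars[:-1]
--     nexts = chars[1:] + [None]
--     out = []
--     for p, c, n in zip(prevs, chars, nexts):
--         if c == "'":
--             out.append("'" if p == "}" or n == "{" else '"')
--         else:
--             out.append(c)
--     return "".join(out)
-- ===== Notes on version B (the rewrite author's own statement) =====
-- stated objective: alternative
-- what changed: B is stateless: it zips the string with its two shifted copies and maps each quote by a local rule (stay a quote iff preceded by '}' or followed by '{', else become a double quote), replacing A's stateful fold with snapshot-and-rollback.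
import Mathlib
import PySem

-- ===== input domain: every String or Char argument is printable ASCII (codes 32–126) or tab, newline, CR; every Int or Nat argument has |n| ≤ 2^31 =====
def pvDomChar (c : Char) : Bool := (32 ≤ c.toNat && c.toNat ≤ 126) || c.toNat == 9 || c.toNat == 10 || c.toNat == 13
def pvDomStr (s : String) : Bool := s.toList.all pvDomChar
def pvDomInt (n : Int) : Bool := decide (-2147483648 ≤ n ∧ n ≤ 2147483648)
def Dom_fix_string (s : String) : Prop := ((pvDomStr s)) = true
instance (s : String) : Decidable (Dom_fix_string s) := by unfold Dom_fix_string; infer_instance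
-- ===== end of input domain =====

-- B replaces A's stateful fold (snapshot at each quote, rollback on a following brace)
-- by a stateless map over the string zipped with its two shifted copies.

-- ===== PORT A =====
-- state: (json_string_fin, last_string, last_c); last_string starts [] (Python leaves it
-- unbound, but it is only read when last_c = '\'' which guarantees it was set).
def fixA_step (st : List Char × List Char × Option Char) (c : Char) :
    List Char × List Char × Option Char :=
  let fin := st.1; let lastS := st.2.1; let lastC := st.2.2
  if c ≠ '\'' then
    let fin1 := fin ++ [c]
    let fin2 := if c = '{' then (if lastC = some '\'' then lastS ++ ['\'', '{'] else fin1) else fin1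
    (fin2, lastS, some c)
  else
    let lastS1 := fin
    let fin1 := if lastC ≠ some '}' then fin ++ ['"'] else fin ++ ['\'']
    (fin1, lastS1, some c)

def fix_string (s : String) : String :=
  String.ofList (s.toList.foldl fixA_step ([], [], none)).1

-- ===== PORT B =====
-- per-position rule: a quote depends only on its neighbours (none = off the end)
def fixB_char (p : Option Char) (c : Char) (n : Option Char) : Char :=
  if c = '\'' then (if p = some '}' ∨ n = some '{' then '\'' else '"') else c

def fix_string_alt (s : String) : String :=
  let chars := s.toList
  let prevs : List (Option Char) := none :: chars.dropLast.map some
  let nexts : List (Option Char) := chars.tail.map some ++ [none]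
  String.ofList ((prevs.zip (chars.zip nexts)).map (fun t => fixB_char t.1 t.2.1 t.2.2))

-- ===== PRECONDITION & SPEC =====
def Spec_fix_string (s : String) (out : String) : Prop := out = fix_string_alt s
instance (s : String) (out : String) : Decidable (Spec_fix_string s out) := by unfold Spec_fix_string; infer_instance

-- ===== CLAIM =====
def Claim_equal_fix_string : Prop := ∀ (s : String), Dom_fix_string s → Spec_fix_string s (fix_string s)

-- ===== LEMMAS AND PROOFS =====

-- proof-only recursive description of the output, carrying the previous char
def gFix : Option Char → List Char → List Char
  | _, [] => []
  | prev, c :: rest =>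
    (if c = '\'' then (if prev = some '}' ∨ rest.head? = some '{' then '\'' else '"') else c)
      :: gFix (some c) rest

-- A's fold computes gFix (the rollback only retracts the single char appended at the quote)
theorem fixA_foldl (rest : List Char) (prev : Option Char) (fin lastS : List Char) :
    (rest.foldl fixA_step (fin, lastS, prev)).1 =
      (if prev = some '\'' ∧ rest.head? = some '{' then lastS ++ ['\''] else fin)
        ++ gFix prev rest := by
  induction rest generalizing prev fin lastS with
  | nil => simp [gFix]
  | cons c t ih =>
    by_cases hc : c = '\''
    · subst hc
      have hs : fixA_step (fin, lastS, prev) '\'' =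
          (fin ++ [if prev ≠ some '}' then '"' else '\''], fin, some '\'') := by
        by_cases hp : prev = some '}' <;> simp [fixA_step, hp]
      rw [List.foldl_cons, hs, ih]
      by_cases ht : t.head? = some '{'
      · by_cases hp : prev = some '}' <;> simp [gFix, ht, hp]
      · by_cases hp : prev = some '}' <;> simp [gFix, ht, hp]
    · have hs : fixA_step (fin, lastS, prev) c =
          (if c = '{' ∧ prev = some '\'' then lastS ++ ['\'', '{'] else fin ++ [c],
            lastS, some c) := by
        by_cases hb : c = '{'
        · by_cases hp : prev = some '\'' <;> simp [fixA_step, hb, hp]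
        · simp [fixA_step, hc, hb]
      rw [List.foldl_cons, hs, ih]
      by_cases hb : c = '{'
      · subst hb
        by_cases hp : prev = some '\''
        · simp [gFix, hc, hp]
        · simp [gFix, hc, hp]
      · simp [gFix, hc, hb]

-- B's zip-map computes gFix
theorem fixB_zip (l : List Char) (p : Option Char) :
    ((p :: l.dropLast.map some).zip (l.zip (l.tail.map some ++ [none]))).map
        (fun t => fixB_char t.1 t.2.1 t.2.2) = gFix p l := by
  induction l generalizing p with
  | nil => simp [gFix]
  | cons c t ih =>
    cases t with
    | nil => simp [gFix, fixB_char]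
    | cons d u =>
      have h := ih (p := some c)
      simp only [List.tail_cons] at h
      simp only [show (c :: d :: u).dropLast = c :: (d :: u).dropLast from rfl,
        List.tail_cons, List.map_cons, List.cons_append, List.zip_cons_cons, h]
      simp [gFix, fixB_char]

-- ===== VERDICT =====
theorem fix_string_spec : Claim_equal_fix_string := by
  intro s _
  unfold Spec_fix_string fix_string fix_string_alt
  rw [fixA_foldl]
  simp only [fixB_zip]
  simp
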